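-- pv_equiv track=rewrite | github.com/sohrabmahmud/fun_love_score_calculator | calculate_love_score.py | calculate_love_score
-- ===== SOURCE A (Python) =====
-- def calculate_love_score(name1, name2):
--     let_t = "T"
--     let_r= "R"
--     let_u = "U"
--     let_e1 = "E"
--
--     t_c = 0
--     r_c = 0
--     u_c = 0
--     e1_c = 0
--
--     let_l = "L"
--     let_o = "O"
--     let_v = "V"
--     let_e2 = "E"
--
--     l_c = 0
--     o_c = 0
--     v_c = 0
--     e2_c = 0
--
--     for name in list(name1 + name2):
--         if name.upper() == let_t:
--             t_c += 1
--         if name.upper() == let_r: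
--             r_c += 1
--         if name.upper() == let_u:
--             u_c += 1
--         if name.upper() == let_e1:
--             e1_c += 1
--
--     for name in list(name1 + name2):
--         if name.upper() == let_l:
--             l_c += 1
--         if name.upper() == let_o:
--             o_c += 1
--         if name.upper() == let_v:
--             v_c += 1
--         if name.upper() == let_e2:
--             e2_c += 1
--
--     true_occurs = str(t_c + r_c + u_c + e1_c)
--     love_occurs = str(l_c + o_c + v_c + e2_c)
--
--     love_score = (true_occurs + love_occurs)
--     return love_score
-- ===== SOURCE B (Python) =====
-- def calculate_love_score(name1, name2):
--     counts = {}
--     for c in name1 + name2: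
--         u = c.upper()
--         counts[u] = counts.get(u, 0) + 1
--     true_sum = sum(counts.get(ch, 0) for ch in "TRUE")
--     love_sum = sum(counts.get(ch, 0) for ch in "LOVE")
--     return str(true_sum) + str(love_sum)
-- ===== Notes on version B (the rewrite author's own statement) =====
-- stated objective: idiomatic
-- what changed: One pass building a frequency dict of uppercased characters replaces A's two passes over the concatenation with eight separate counters; the two sums are then four dict lookups each ('E' counted into both, as in A).
import Mathlib
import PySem

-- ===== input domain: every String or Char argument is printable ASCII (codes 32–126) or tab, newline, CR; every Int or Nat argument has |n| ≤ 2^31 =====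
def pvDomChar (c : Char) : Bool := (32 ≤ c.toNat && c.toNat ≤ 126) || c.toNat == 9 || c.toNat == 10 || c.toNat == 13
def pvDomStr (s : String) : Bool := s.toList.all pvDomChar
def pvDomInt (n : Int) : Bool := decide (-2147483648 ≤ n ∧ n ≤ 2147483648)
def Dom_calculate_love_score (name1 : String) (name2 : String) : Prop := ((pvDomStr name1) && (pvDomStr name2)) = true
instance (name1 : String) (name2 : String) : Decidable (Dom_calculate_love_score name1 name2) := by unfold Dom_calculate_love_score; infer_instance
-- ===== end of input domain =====

-- B replaces A's two passes with eight scalar counters by one pass building a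
-- frequency dict of uppercased characters, then four lookups per sum (idiomatic; same cost).

-- ===== PORT A =====
-- one step of A's first loop: four independent ifs updating (t_c, r_c, u_c, e1_c)
def pvStepTrue (st : Int × Int × Int × Int) (c : Char) : Int × Int × Int × Int :=
  let t := if PySem.Chars.upperChar c == 'T' then st.1 + 1 else st.1
  let r := if PySem.Chars.upperChar c == 'R' then st.2.1 + 1 else st.2.1
  let u := if PySem.Chars.upperChar c == 'U' then st.2.2.1 + 1 else st.2.2.1
  let e := if PySem.Chars.upperChar c == 'E' then st.2.2.2 + 1 else st.2.2.2
  (t, r, u, e)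

-- one step of A's second loop: four independent ifs updating (l_c, o_c, v_c, e2_c)
def pvStepLove (st : Int × Int × Int × Int) (c : Char) : Int × Int × Int × Int :=
  let l := if PySem.Chars.upperChar c == 'L' then st.1 + 1 else st.1
  let o := if PySem.Chars.upperChar c == 'O' then st.2.1 + 1 else st.2.1
  let v := if PySem.Chars.upperChar c == 'V' then st.2.2.1 + 1 else st.2.2.1
  let e := if PySem.Chars.upperChar c == 'E' then st.2.2.2 + 1 else st.2.2.2
  (l, o, v, e)

def calculate_love_score (name1 : String) (name2 : String) : String :=
  let chars := name1.toList ++ name2.toList      -- list(name1 + name2)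
  let st1 := chars.foldl pvStepTrue (0, 0, 0, 0)
  let st2 := chars.foldl pvStepLove (0, 0, 0, 0)
  let true_occurs := PySem.Int.toStr (st1.1 + st1.2.1 + st1.2.2.1 + st1.2.2.2)
  let love_occurs := PySem.Int.toStr (st2.1 + st2.2.1 + st2.2.2.1 + st2.2.2.2)
  true_occurs ++ love_occurs

-- ===== PORT B =====
-- counts[u] = counts.get(u, 0) + 1 over the uppercased characters; keys are the
-- length-1 strings c.upper(), represented as Char
def calculate_love_score_alt (name1 : String) (name2 : String) : String :=
  let counts : PySem.Dict Char Int :=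
    (name1.toList ++ name2.toList).foldl
      (fun d c => let u := PySem.Chars.upperChar c; d.insert u (d.getD u 0 + 1))
      PySem.Dict.empty
  let true_sum := ['T', 'R', 'U', 'E'].foldl (fun acc ch => acc + counts.getD ch 0) 0   -- for ch in "TRUE"
  let love_sum := ['L', 'O', 'V', 'E'].foldl (fun acc ch => acc + counts.getD ch 0) 0   -- for ch in "LOVE"
  PySem.Int.toStr true_sum ++ PySem.Int.toStr love_sum

-- ===== PRECONDITION & SPEC =====
def Spec_calculate_love_score (name1 : String) (name2 : String) (out : String) : Prop := out = calculate_love_score_alt name1 name2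
instance (name1 : String) (name2 : String) (out : String) : Decidable (Spec_calculate_love_score name1 name2 out) := by unfold Spec_calculate_love_score; infer_instance

-- ===== CLAIM (what is proved, stated in full; the proofs are below) =====
def Claim_equal_calculate_love_score : Prop := ∀ (name1 : String) (name2 : String), Dom_calculate_love_score name1 name2 → Spec_calculate_love_score name1 name2 (calculate_love_score name1 name2)

-- ===== LEMMAS AND PROOFS =====

-- A's first loop computes, in each component, the count of the matching uppercased letter.
theorem foldl_pvStepTrue (l : List Char) (t r u e : Int) :
    l.foldl pvStepTrue (t, r, u, e) =
      (t + ((l.map PySem.Chars.upperChar).count 'T' : Int),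
       r + ((l.map PySem.Chars.upperChar).count 'R' : Int),
       u + ((l.map PySem.Chars.upperChar).count 'U' : Int),
       e + ((l.map PySem.Chars.upperChar).count 'E' : Int)) := by
  induction l generalizing t r u e with
  | nil => simp
  | cons c cs ih =>
      simp only [List.foldl_cons, pvStepTrue, List.map_cons, List.count_cons, ih]
      split_ifs <;> simp_all <;> push_cast <;> ring_nf <;> simp_all

theorem foldl_pvStepLove (lst : List Char) (l o v e : Int) :
    lst.foldl pvStepLove (l, o, v, e) =
      (l + ((lst.map PySem.Chars.upperChar).count 'L' : Int),
       o + ((lst.map PySem.Chars.upperChar).count 'O' : Int),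
       v + ((lst.map PySem.Chars.upperChar).count 'V' : Int),
       e + ((lst.map PySem.Chars.upperChar).count 'E' : Int)) := by
  induction lst generalizing l o v e with
  | nil => simp
  | cons c cs ih =>
      simp only [List.foldl_cons, pvStepLove, List.map_cons, List.count_cons, ih]
      split_ifs <;> simp_all <;> push_cast <;> ring_nf <;> simp_all

-- B's dict-building loop is the counting loop over the uppercased characters.
theorem alt_counts_getD (l : List Char) (d : PySem.Dict Char Int) (v : Char) :
    (l.foldl (fun d c => d.insert (PySem.Chars.upperChar c) (d.getD (PySem.Chars.upperChar c) 0 + 1)) d).getD v 0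
      = d.getD v 0 + ((l.map PySem.Chars.upperChar).count v : Int) := by
  induction l generalizing d with
  | nil => simp
  | cons c cs ih =>
      simp only [List.foldl_cons, List.map_cons, List.count_cons, ih,
        PySem.Dict.getD_insert]
      by_cases h : v = PySem.Chars.upperChar c
      · simp [h, add_comm, add_left_comm, add_assoc]
      · simp [h, Ne.symm h, add_comm, add_left_comm, add_assoc]

-- ===== VERDICT (by name: the statement is the Claim_ definition above) =====
theorem calculate_love_score_spec : Claim_equal_calculate_love_score := by
  intro name1 name2 _
  show _ = _
  simp only [calculate_love_score, calculate_love_score_alt,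
    foldl_pvStepTrue, foldl_pvStepLove]
  simp only [alt_counts_getD, List.foldl_cons, List.foldl_nil, PySem.Dict.getD_empty]
  simp [add_comm, add_left_comm, add_assoc]
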